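-- pv_equiv track=rewrite | github.com/zfmandell/the-workshop | rpkm_calc.py | feature_place
-- ===== SOURCE A (Python) =====
-- def feature_place(gff3,cov):
--     #will place each gene+intergenic feature into coverage context, return dict key = feature (gene if CDS or gene-gene if intra), value = length,coverage sum
--     feature_dict = {}
--     for item in gff3:
--         length = item[1][1]-item[1][0]
--         coverage = sum(cov[item[1][0]:item[1][1]+1])
--         feature_dict[item[0]] = [length,coverage]
--     for item in gff3:
--         if gff3.index(item) < len(gff3)-1:
--             length = gff3[gff3.index(item)+1][1][0]-gff3[gff3.index(item)][1][1]
--             if length < 0: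
--                 length = length*-1
--                 coverage = sum(cov[gff3[gff3.index(item)+1][1][0]+1:gff3[gff3.index(item)][1][1]])
--             else:
--                 coverage = sum(cov[gff3[gff3.index(item)][1][1]:gff3[gff3.index(item)+1][1][0]+1])
--             feature_dict["-".join([gff3[gff3.index(item)][0],gff3[gff3.index(item)+1][0]])] = [length,coverage]
--     return feature_dict
-- ===== SOURCE B (Python) =====
-- def feature_place(gff3, cov):
--     # Prefix-sum array answers each coverage slice sum; a first-occurrence index
--     # map replaces the repeated gff3.index scans (same first-match semantics).
--     n = len(cov)
--     P = [0]
--     for c in cov: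
--         P.append(P[-1] + c)
--
--     def rng(a, b):
--         # sum(cov[a:b]) via the prefix sums, with Python's slice clamping
--         a = max(0, a + n) if a < 0 else min(a, n)
--         b = max(0, b + n) if b < 0 else min(b, n)
--         return P[b] - P[a] if a < b else 0
--
--     first = {}
--     for i, item in enumerate(gff3):
--         if item not in first:
--             first[item] = i
--
--     out = {}
--     for name, (s, e) in gff3:
--         out[name] = [e - s, rng(s, e + 1)]
--     for item in gff3:
--         j = first[item]
--         if j < len(gff3) - 1:
--             name, (s, e) = gff3[j]
--             name2, (s2, e2) = gff3[j + 1]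
--             length = s2 - e
--             if length < 0:
--                 out[name + "-" + name2] = [-length, rng(s2 + 1, e)]
--             else:
--                 out[name + "-" + name2] = [length, rng(e, s2 + 1)]
--     return out
-- ===== Notes on version B (the rewrite author's own statement) =====
-- stated objective: alternative
-- what changed: B precomputes a prefix-sum array and answers every coverage slice sum from it, and builds a first-occurrence index dictionary once (enumerate + setdefault-style insert) instead of A's repeated gff3.index linear scans, keeping list.index's first-match semantics exactly.
import Mathlib
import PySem

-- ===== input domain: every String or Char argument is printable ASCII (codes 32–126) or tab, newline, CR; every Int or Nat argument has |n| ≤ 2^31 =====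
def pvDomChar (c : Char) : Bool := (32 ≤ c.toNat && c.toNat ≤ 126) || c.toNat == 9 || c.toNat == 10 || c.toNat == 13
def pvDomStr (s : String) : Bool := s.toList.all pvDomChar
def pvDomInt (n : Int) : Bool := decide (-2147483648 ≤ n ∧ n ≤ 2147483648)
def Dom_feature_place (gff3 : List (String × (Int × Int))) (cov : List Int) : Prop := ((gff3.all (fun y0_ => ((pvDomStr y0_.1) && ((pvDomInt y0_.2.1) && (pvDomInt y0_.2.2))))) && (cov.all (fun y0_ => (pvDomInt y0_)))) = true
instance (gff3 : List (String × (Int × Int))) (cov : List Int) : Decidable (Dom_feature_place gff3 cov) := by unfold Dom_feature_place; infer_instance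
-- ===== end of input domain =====

-- B replaces A's repeated gff3.index scans and per-feature slice sums by a
-- first-occurrence index map and a prefix-sum array (objective: alternative algorithm).


-- ===== PORT A =====
def feature_place (gff3 : List (String × (Int × Int))) (cov : List Int) : List (String × List Int) :=
  let d1 := gff3.foldl (fun d item =>
    let length := item.2.2 - item.2.1
    let coverage := (PySem.List.slice cov (some item.2.1) (some (item.2.2 + 1))).sum
    d.insert item.1 [length, coverage]) PySem.Dict.empty
  let d2 := gff3.foldl (fun d item =>
    match PySem.List.index? gff3 item with
    | none => d  -- unreachable: item ∈ gff3, so .index succeeds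
    | some idx =>
      if (idx : Int) < (gff3.length : Int) - 1 then
        match PySem.List.pyGet? gff3 (idx : Int), PySem.List.pyGet? gff3 ((idx : Int) + 1) with
        | some cur, some nxt =>
          let length := nxt.2.1 - cur.2.2
          if length < 0 then
            d.insert (PySem.Str.join "-" [cur.1, nxt.1])
              [length * -1, (PySem.List.slice cov (some (nxt.2.1 + 1)) (some cur.2.2)).sum]
          else
            d.insert (PySem.Str.join "-" [cur.1, nxt.1])
              [length, (PySem.List.slice cov (some cur.2.2) (some (nxt.2.1 + 1))).sum]
        | _, _ => d  -- unreachable: the guard keeps both indices in range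
      else d) d1
  d2.items

-- ===== PORT B =====
-- P = [0]; for c in cov: P.append(P[-1] + c)
def pvPrefix (cov : List Int) : List Int :=
  cov.foldl (fun p c => p ++ [PySem.List.pyGetD p (-1) 0 + c]) [0]

-- rng(a, b) = sum(cov[a:b]) from the prefix sums, with Python's slice clamping
def pvRng (P : List Int) (n : Int) (a b : Int) : Int :=
  let a' := if a < 0 then max 0 (a + n) else min a n
  let b' := if b < 0 then max 0 (b + n) else min b n
  if a' < b' then PySem.List.pyGetD P b' 0 - PySem.List.pyGetD P a' 0 else 0

-- first = {}; for i, item in enumerate(gff3): if item not in first: first[item] = i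
def pvFirst (gff3 : List (String × (Int × Int))) : PySem.Dict (String × (Int × Int)) Int :=
  (PySem.List.enumerate gff3).foldl (fun d p =>
    if d.contains p.2 then d else d.insert p.2 p.1) PySem.Dict.empty

def feature_place_alt (gff3 : List (String × (Int × Int))) (cov : List Int) : List (String × List Int) :=
  let n : Int := cov.length
  let P := pvPrefix cov
  let first := pvFirst gff3
  let d1 := gff3.foldl (fun d item =>
    d.insert item.1 [item.2.2 - item.2.1, pvRng P n item.2.1 (item.2.2 + 1)]) PySem.Dict.empty
  let d2 := gff3.foldl (fun d item =>
    -- Option.elim defaults (d) are unreachable: first has every item, the guard keeps indices in range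
    (first.get? item).elim d (fun j =>
      if j < (gff3.length : Int) - 1 then
        (PySem.List.pyGet? gff3 j).elim d (fun cur =>
          (PySem.List.pyGet? gff3 (j + 1)).elim d (fun nxt =>
            let length := nxt.2.1 - cur.2.2
            if length < 0 then
              d.insert (cur.1 ++ "-" ++ nxt.1) [-length, pvRng P n (nxt.2.1 + 1) cur.2.2]
            else
              d.insert (cur.1 ++ "-" ++ nxt.1) [length, pvRng P n cur.2.2 (nxt.2.1 + 1)]))
      else d)) d1
  d2.items

-- ===== PRECONDITION & SPEC =====
def Spec_feature_place (gff3 : List (String × (Int × Int))) (cov : List Int) (out : List (String × List Int)) : Prop := out = feature_place_alt gff3 cov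
instance (gff3 : List (String × (Int × Int))) (cov : List Int) (out : List (String × List Int)) : Decidable (Spec_feature_place gff3 cov out) := by unfold Spec_feature_place; infer_instance

-- ===== CLAIM (what is proved, stated in full; the proofs are below) =====
def Claim_equal_feature_place : Prop := ∀ (gff3 : List (String × (Int × Int))) (cov : List Int), Dom_feature_place gff3 cov → Spec_feature_place gff3 cov (feature_place gff3 cov)

-- ===== LEMMAS AND PROOFS =====

-- the prefix-sum list is exactly the partial sums of cov
theorem pvPrefix_eq (cov : List Int) :
    pvPrefix cov = (List.range (cov.length + 1)).map (fun k => (cov.take k).sum) := by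
  induction cov using List.reverseRecOn with
  | nil => simp [pvPrefix]
  | append_singleton cov c ih =>
    have hne : pvPrefix cov ≠ [] := by
      rw [ih]; simp
    have hlast : PySem.List.pyGetD (pvPrefix cov) (-1) 0 = cov.sum := by
      rw [PySem.List.pyGetD_neg_one _ _ hne]
      rw [List.getLast_eq_getElem]
      simp [ih]
    have hstep : pvPrefix (cov ++ [c]) = pvPrefix cov ++ [cov.sum + c] := by
      simp [pvPrefix, List.foldl_append]
      rw [show (cov.foldl (fun p c => p ++ [PySem.List.pyGetD p (-1) 0 + c]) [0]) = pvPrefix cov from rfl,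
        hlast]
    have hR : (List.range ((cov ++ [c]).length + 1)).map (fun k => (List.take k (cov ++ [c])).sum)
        = (List.range (cov.length + 1)).map (fun k => (List.take k (cov ++ [c])).sum)
          ++ [(List.take (cov.length + 1) (cov ++ [c])).sum] := by
      rw [List.length_append, List.length_singleton, List.range_succ, List.map_append]
      simp
    rw [hstep, ih, hR]
    congr 1
    · apply List.map_congr_left
      intro k hk
      rw [List.mem_range] at hk
      rw [List.take_append_of_le_length (by omega)]
    · rw [List.take_of_length_le (by simp)]
      simp

-- reading the prefix-sum list at a clamped index yields the partial sum
theorem pvPrefix_getD (cov : List Int) (k : Nat) (hk : k ≤ cov.length) :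
    PySem.List.pyGetD (pvPrefix cov) (k : Int) 0 = (cov.take k).sum := by
  rw [PySem.List.pyGetD_natCast, pvPrefix_eq, PySem.List.getD_map_range _ _ _ _ (by omega)]

theorem clampIdx_cast (n : Nat) (i : Int) :
    ((PySem.List.clampIdx n i : Nat) : Int) = if i < 0 then max 0 (i + n) else min i n := by
  simp only [PySem.List.clampIdx]
  split_ifs <;> push_cast <;> omega

-- sum of a Python slice of cov = pvRng on the prefix sums
theorem sliceSum (cov : List Int) (a b : Int) :
    (PySem.List.slice cov (some a) (some b)).sum = pvRng (pvPrefix cov) cov.length a b := by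
  simp only [PySem.List.slice, pvRng]
  rw [← clampIdx_cast cov.length a, ← clampIdx_cast cov.length b]
  set a' := PySem.List.clampIdx cov.length a with ha'
  set b' := PySem.List.clampIdx cov.length b with hb'
  by_cases h : a' < b'
  · rw [if_pos (by exact_mod_cast h)]
    rw [pvPrefix_getD cov a' (PySem.List.clampIdx_le _ _), pvPrefix_getD cov b' (PySem.List.clampIdx_le _ _)]
    have : cov.take b' = cov.take a' ++ (cov.drop a').take (b' - a') := by
      rw [← List.take_add]
      congr 1
      omega
    rw [this, List.sum_append]
    ring
  · rw [if_neg (by exact_mod_cast h)]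
    have : b' - a' = 0 := by omega
    rw [this]
    simp

-- the first-occurrence dict looks up exactly list.index's first match
theorem pvFirst_aux (l : List (String × (Int × Int))) (s : Int)
    (d : PySem.Dict (String × (Int × Int)) Int) (v : String × (Int × Int)) :
    ((PySem.List.enumerate l s).foldl (fun d p =>
      if d.contains p.2 then d else d.insert p.2 p.1) d).get? v =
    (d.get? v).or ((PySem.List.index? l v).map (fun k : Nat => s + (k : Int))) := by
  induction l generalizing s d with
  | nil => simp [PySem.List.enumerate, PySem.List.index?]
  | cons x xs ih =>
    rw [PySem.List.enumerate_cons, List.foldl_cons, ih]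
    by_cases hv : x = v
    · subst hv
      rw [PySem.List.index?_cons_self]
      by_cases hc : d.contains x
      · rw [if_pos hc]
        rw [PySem.Dict.contains_eq_isSome_get?] at hc
        rcases ho : d.get? x with _ | w
        · rw [ho] at hc; simp at hc
        · simp [Option.or]
      · rw [if_neg hc]
        rw [PySem.Dict.contains_eq_isSome_get?] at hc
        rcases ho : d.get? x with _ | w
        · simp [PySem.Dict.get?_insert_self, Option.or]
        · rw [ho] at hc; simp at hc
    · rw [PySem.List.index?_cons_of_ne _ hv]
      have hstep : (if d.contains x then d else d.insert x s).get? v = d.get? v := by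
        split_ifs with hc
        · rfl
        · exact PySem.Dict.get?_insert_of_ne d _ (fun h => hv h.symm)
      rw [hstep]
      rcases PySem.List.index? xs v with _ | k
      · rfl
      · simp only [Option.map_some]
        congr 2
        push_cast
        omega

theorem pvFirst_get (gff3 : List (String × (Int × Int))) (v : String × (Int × Int)) :
    (pvFirst gff3).get? v = (PySem.List.index? gff3 v).map (fun k : Nat => (k : Int)) := by
  rw [pvFirst, pvFirst_aux]
  simp [PySem.Dict.get?_empty, Option.or]

theorem joinPair (x y : String) : PySem.Str.join "-" [x, y] = x ++ "-" ++ y := by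
  have h1 : (PySem.Str.join "-" [x, y]).toList = (x ++ "-" ++ y).toList := by
    rw [PySem.Str.toList_join]
    simp [PySem.Chars.join_cons_cons, PySem.Chars.join_singleton, String.toList_append]
  exact String.toList_inj.mp h1

-- ===== VERDICT (by name: the statement is the Claim_ definition above) =====
theorem feature_place_spec : Claim_equal_feature_place := by
  intro gff3 cov _dom
  unfold Spec_feature_place
  simp only [feature_place, feature_place_alt]
  congr 1
  have hd1 : gff3.foldl (fun d item =>
      d.insert item.1 [item.2.2 - item.2.1, (PySem.List.slice cov (some item.2.1) (some (item.2.2 + 1))).sum])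
      PySem.Dict.empty
      = gff3.foldl (fun d item =>
      d.insert item.1 [item.2.2 - item.2.1, pvRng (pvPrefix cov) (cov.length : Int) item.2.1 (item.2.2 + 1)])
      PySem.Dict.empty := by
    apply PySem.List.foldl_congr_mem
    intro d item _
    rw [sliceSum]
  rw [hd1]
  apply PySem.List.foldl_congr_mem
  intro d item hmem
  obtain ⟨k, hk⟩ : ∃ k, PySem.List.index? gff3 item = some k := by
    rw [Option.isSome_iff_exists.symm, PySem.List.index?_isSome_iff]
    exact hmem
  rw [hk, pvFirst_get, hk]
  simp only [Option.map_some, Option.elim]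
  split_ifs with hguard
  · rcases h1 : PySem.List.pyGet? gff3 (k : Int) with _ | cur
    · rcases h2 : PySem.List.pyGet? gff3 ((k : Int) + 1) with _ | nxt <;> rfl
    · rcases h2 : PySem.List.pyGet? gff3 ((k : Int) + 1) with _ | nxt
      · rfl
      · simp only []
        split_ifs with hlen
        · rw [joinPair, sliceSum]
          congr 2
          ring
        · rw [joinPair, sliceSum]
  · rfl
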